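-- pv_equiv track=rewrite | github.com/MrBrantCode/unitest_baseline | mut_generate/mist_train_cf/cf_59210/solution.py | embed_data_in_audio
-- ===== SOURCE A (Python) =====
-- def embed_data_in_audio(audio_signal, secret_message):
--     """
--     Embed a secret message within an audio signal using the Least Significant Bit (LSB) steganography technique.
--
--     Parameters:
--     audio_signal (list): A list of integers representing the audio data.
--     secret_message (str): A string representing the message to be hidden.
--
--     Returns:
--     list: The modified audio signal with the secret message embedded.
--     """
--     # Convert the secret message to binary
--     binary_message = ''.join(format(ord(char), '08b') for char in secret_message)
--
--     # Initialize an empty list to store the modified audio signal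
--     modified_signal = []
--
--     # Initialize a counter to keep track of the current bit in the binary message
--     bit_index = 0
--
--     # Iterate over the audio signal
--     for sample in audio_signal:
--         # If there are still bits left in the binary message
--         if bit_index < len(binary_message):
--             # Get the least significant bit of the current sample
--             lsb = sample & 1
--
--             # Get the current bit from the binary message
--             bit = int(binary_message[bit_index])
--
--             # Replace the least significant bit of the sample with the current bit
--             modified_sample = (sample & ~1) | bit
--
--             # Append the modified sample to the modified audio signal
--             modified_signal.append(modified_sample)
--
--             # Increment the bit index
--             bit_index += 1
--         else:
--             # If there are no more bits left in the binary message, append the original sample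
--             modified_signal.append(sample)
--
--     return modified_signal
-- ===== SOURCE B (Python) =====
-- def embed_data_in_audio(audio_signal, secret_message):
--     # Per-character block embedding: no binary message string is ever built.
--     # Each character claims the next block of up to 8 samples; its bits are
--     # extracted directly from the char code by shifting.
--     out = []
--     pos = 0
--     for ch in secret_message:
--         code = ord(ch)
--         block = audio_signal[pos:pos + 8]
--         out.extend((s & ~1) | ((code >> (7 - i)) & 1) for i, s in enumerate(block))
--         pos += len(block)
--     out.extend(audio_signal[pos:])
--     return out
-- ===== Notes on version B (the rewrite author's own statement) =====
-- stated objective: alternative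
-- what changed: B never builds the binary message string: it recurses over the message character by character, embedding each char's 8 bits (extracted by shifting the char code) into the next 8-sample block, instead of A's single counter-driven pass over a precomputed bit string.
import Mathlib
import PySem

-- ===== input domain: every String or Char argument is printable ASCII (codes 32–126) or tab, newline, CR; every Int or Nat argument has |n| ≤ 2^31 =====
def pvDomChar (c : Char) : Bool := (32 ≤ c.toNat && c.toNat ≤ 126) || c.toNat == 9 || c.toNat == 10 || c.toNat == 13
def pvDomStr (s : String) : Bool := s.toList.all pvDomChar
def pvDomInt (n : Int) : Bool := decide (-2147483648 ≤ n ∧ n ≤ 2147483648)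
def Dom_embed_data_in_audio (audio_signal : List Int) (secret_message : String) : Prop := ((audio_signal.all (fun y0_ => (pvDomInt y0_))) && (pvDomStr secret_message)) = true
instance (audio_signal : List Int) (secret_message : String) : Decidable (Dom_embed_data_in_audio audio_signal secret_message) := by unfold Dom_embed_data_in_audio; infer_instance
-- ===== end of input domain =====

-- B loops over the message characters, embedding each char's 8 bits (extracted by shifting the
-- char code) into the next 8-sample block via a position cursor — no binary bit-string is built; same cost.

-- ===== PORT A =====
-- format(ord(char), '08b'): the 8 binary digits of the char code (codes here are < 256, so exactly 8 digits)
def pvFmt8 (n : Nat) : List Char :=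
  (List.range 8).map (fun i => if n.testBit (7 - i) then '1' else '0')

-- int(b) for a binary digit character
def pvDigitInt (c : Char) : Int := (c.toNat : Int) - 48

-- loop body of A: state = (modified_signal, bit_index)
def pvStepA (bm : List Char) (st : List Int × Nat) (sample : Int) : List Int × Nat :=
  if st.2 < bm.length then
    (st.1 ++ [PySem.Int.bor (PySem.Int.band sample (-2)) (pvDigitInt (bm.getD st.2 '0'))], st.2 + 1)
  else
    (st.1 ++ [sample], st.2)

def embed_data_in_audio (audio_signal : List Int) (secret_message : String) : List Int :=
  let binary_message := secret_message.toList.flatMap (fun c => pvFmt8 c.toNat)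
  (audio_signal.foldl (pvStepA binary_message) ([], 0)).1

-- ===== PORT B =====
-- loop body of B: state = (out, pos); audio_signal[pos:pos+8] with pos >= 0 is drop-then-take (exact)
def pvStepB (audio : List Int) (st : List Int × Nat) (c : Char) : List Int × Nat :=
  let block := (audio.drop st.2).take 8
  (st.1 ++ (PySem.List.enumerate block).map
      (fun p => PySem.Int.bor (PySem.Int.band p.2 (-2))
        (PySem.Int.band ((c.toNat : Int) >>> (7 - p.1).toNat) 1)),
   st.2 + block.length)

def embed_data_in_audio_alt (audio_signal : List Int) (secret_message : String) : List Int :=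
  let st := secret_message.toList.foldl (pvStepB audio_signal) ([], 0)
  st.1 ++ audio_signal.drop st.2

-- ===== PRECONDITION & SPEC =====
def Spec_embed_data_in_audio (audio_signal : List Int) (secret_message : String) (out : List Int) : Prop := out = embed_data_in_audio_alt audio_signal secret_message
instance (audio_signal : List Int) (secret_message : String) (out : List Int) : Decidable (Spec_embed_data_in_audio audio_signal secret_message out) := by unfold Spec_embed_data_in_audio; infer_instance

-- ===== CLAIM (what is proved, stated in full; the proofs are below) =====
def Claim_equal_embed_data_in_audio : Prop := ∀ (audio_signal : List Int) (secret_message : String), Dom_embed_data_in_audio audio_signal secret_message → Spec_embed_data_in_audio audio_signal secret_message (embed_data_in_audio audio_signal secret_message)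

-- ===== LEMMAS AND PROOFS =====
-- proof-side recursive characterisation of B's loop
def pvEmbedRec (audio : List Int) (msg : List Char) : List Int :=
  match msg with
  | [] => audio
  | c :: cs =>
    ((PySem.List.enumerate (audio.take 8)).map
      (fun p => PySem.Int.bor (PySem.Int.band p.2 (-2))
        (PySem.Int.band ((c.toNat : Int) >>> (7 - p.1).toNat) 1)))
      ++ pvEmbedRec (audio.drop 8) cs

-- A's stateful loop, characterised: zip-map over the prefix plus the untouched tail
theorem pvLoopA_eq (bm : List Char) :
    ∀ (audio : List Int) (acc : List Int) (bi : Nat), bi ≤ bm.length →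
      (audio.foldl (pvStepA bm) (acc, bi)).1 =
        acc ++ ((audio.zip (bm.drop bi)).map (fun p => PySem.Int.bor (PySem.Int.band p.1 (-2)) (pvDigitInt p.2)))
            ++ audio.drop (bm.length - bi) := by
  intro audio
  induction audio with
  | nil => intro acc bi h; simp
  | cons s rest ih =>
    intro acc bi h
    by_cases hlt : bi < bm.length
    · have hdrop : bm.drop bi = bm[bi] :: bm.drop (bi + 1) :=
        List.drop_eq_getElem_cons hlt
      have hn : bm.length - bi = (bm.length - (bi + 1)) + 1 := by omega
      have hgd : bm.getD bi '0' = bm[bi] := List.getD_eq_getElem bm '0' hlt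
      simp only [List.foldl_cons, pvStepA, hlt, if_pos, hgd]
      rw [ih _ (bi + 1) (by omega), hn, hdrop]
      simp only [List.zip_cons_cons, List.map_cons, List.drop_succ_cons,
        List.append_assoc, List.singleton_append]
    · have hbi : bi = bm.length := by omega
      have hdrop : bm.drop bi = [] := by
        apply List.drop_eq_nil_of_le; omega
      simp only [List.foldl_cons, pvStepA, hlt, if_neg, not_false_iff]
      rw [ih _ bi h, hdrop, hbi]
      simp

-- zip against an appended bit list splits at the first list's length
theorem pvZipSplit (l1 l2 : List Char) :
    ∀ (xs : List Int), xs.zip (l1 ++ l2) =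
      (xs.take l1.length).zip l1 ++ (xs.drop l1.length).zip l2 := by
  induction l1 with
  | nil => intro xs; simp
  | cons c cs ih =>
    intro xs
    cases xs with
    | nil => simp
    | cons x xs => simp [ih]

-- B's per-char block equals A's zip-map over that block
theorem pvBlockEq (c : Char) (xs : List Int) (hx : xs.length ≤ 8) :
    (PySem.List.enumerate xs).map
      (fun p => PySem.Int.bor (PySem.Int.band p.2 (-2))
        (PySem.Int.band (((c.toNat : Int)) >>> (7 - p.1).toNat) 1)) =
    (xs.zip (pvFmt8 c.toNat)).map
      (fun p => PySem.Int.bor (PySem.Int.band p.1 (-2)) (pvDigitInt p.2)) := by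
  apply List.ext_getElem
  · simp [pvFmt8, PySem.List.length_enumerate]
    omega
  · intro i h1 h2
    have hi : i < xs.length := by
      simpa [PySem.List.length_enumerate] using h1
    have hi8 : i < 8 := by omega
    have hzl : i < (xs.zip (pvFmt8 c.toNat)).length := by
      simpa [pvFmt8] using h2
    simp only [List.getElem_map, PySem.List.getElem_enumerate, List.getElem_zip]
    have hfmt : (pvFmt8 c.toNat)[i]'(by simp [pvFmt8]; omega) =
        (if c.toNat.testBit (7 - i) then '1' else '0') := by
      simp [pvFmt8]
    rw [hfmt]
    congr 1
    have hsh : ((7 : Int) - ((0 : Int) + i)).toNat = 7 - i := by omega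
    rw [hsh]
    have : ((c.toNat : Int) >>> (((7 - i : Nat)) : Int)) = ((c.toNat >>> (7 - i) : Nat) : Int) := by
      simp [Int.shiftRight_natCast]
    rw [this, PySem.Int.band_of_nonneg (by positivity) (by norm_num)]
    simp only [Int.toNat_natCast, Int.toNat_one, Nat.and_one_is_mod, Nat.shiftRight_eq_div_pow]
    have ht : c.toNat.testBit (7 - i) = decide (c.toNat / 2 ^ (7 - i) % 2 = 1) :=
      Nat.testBit_eq_decide_div_mod_eq
    by_cases hb : c.toNat / 2 ^ (7 - i) % 2 = 1
    · rw [ht, hb]; simp; decide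
    · have h0 : c.toNat / 2 ^ (7 - i) % 2 = 0 := by omega
      rw [ht, h0]; simp; decide

-- B's recursion, characterised the same way
theorem pvEmbedRec_eq : ∀ (msg : List Char) (audio : List Int),
    pvEmbedRec audio msg =
      ((audio.zip (msg.flatMap (fun c => pvFmt8 c.toNat))).map
        (fun p => PySem.Int.bor (PySem.Int.band p.1 (-2)) (pvDigitInt p.2)))
        ++ audio.drop (msg.flatMap (fun c => pvFmt8 c.toNat)).length := by
  intro msg
  induction msg with
  | nil => intro audio; simp [pvEmbedRec]
  | cons c cs ih =>
    intro audio
    have hlen : (pvFmt8 c.toNat).length = 8 := by simp [pvFmt8]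
    simp only [pvEmbedRec, List.flatMap_cons]
    rw [pvZipSplit, hlen, List.map_append, ih (audio.drop 8)]
    rw [pvBlockEq c (audio.take 8) (by simp)]
    simp [List.drop_drop, List.length_append, hlen, List.append_assoc]

-- B's foldl with cursor equals the recursive characterisation
theorem pvFoldB_eq (audio : List Int) : ∀ (msg : List Char) (acc : List Int) (pos : Nat),
    (msg.foldl (pvStepB audio) (acc, pos)).1
      ++ audio.drop (msg.foldl (pvStepB audio) (acc, pos)).2
    = acc ++ pvEmbedRec (audio.drop pos) msg := by
  intro msg
  induction msg with
  | nil => intro acc pos; simp [pvEmbedRec]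
  | cons c cs ih =>
    intro acc pos
    simp only [List.foldl_cons, pvStepB]
    rw [ih]
    have hdd : audio.drop (pos + ((audio.drop pos).take 8).length)
        = (audio.drop pos).drop 8 := by
      rw [List.length_take]
      by_cases h : (audio.drop pos).length ≤ 8
      · rw [min_eq_right h]
        rw [List.drop_eq_nil_of_le (i := 8) h,
          List.drop_eq_nil_of_le (by simp [List.length_drop] at h ⊢; omega)]
      · rw [min_eq_left (by omega), ← List.drop_drop]
    rw [hdd]
    simp [pvEmbedRec]

-- ===== VERDICT (by name: the statement is the Claim_ definition above) =====
theorem embed_data_in_audio_spec : Claim_equal_embed_data_in_audio := by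
  intro audio msg _
  unfold Spec_embed_data_in_audio embed_data_in_audio embed_data_in_audio_alt
  simp only []
  rw [pvLoopA_eq _ audio [] 0 (Nat.zero_le _), pvFoldB_eq, List.drop_zero,
    pvEmbedRec_eq]
  simp
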